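-- pv_equiv track=rewrite | github.com/OpenedClosed/algorithms | *Ловкость рук.py | touch_the_button
-- ===== SOURCE A (Python) =====
-- def touch_the_button(fingers, field):
--     """Функция, определяющая получит ли пара
--     игрков балл при попытке нажать на нужные
--     клавиши на игровом поле"""
--     score = 0
--     counter = {}
--     for line in field:
--         for num in line:
--             counter[num] = counter.get(num, 0) + 1
--
--     for value in counter:
--         if counter[value] <= fingers and value != '.':
--             score += 1
--     return score
-- ===== SOURCE B (Python) =====
-- def touch_the_button(fingers, field):
--     """Sort the flattened field, then scan runs of equal cells:
--     count each non-'.' run of length <= fingers."""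
--     cells = sorted(c for row in field for c in row)
--     score = 0
--     i = 0
--     n = len(cells)
--     while i < n:
--         j = i
--         while j < n and cells[j] == cells[i]:
--             j += 1
--         if cells[i] != '.' and j - i <= fingers:
--             score += 1
--         i = j
--     return score
-- ===== Notes on version B (the rewrite author's own statement) =====
-- stated objective: alternative
-- what changed: Replaces A's dict count-then-filter with flatten, sort, then a single scan over runs of equal consecutive cells, counting each non-'.' run of length at most fingers.
import Mathlib
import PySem

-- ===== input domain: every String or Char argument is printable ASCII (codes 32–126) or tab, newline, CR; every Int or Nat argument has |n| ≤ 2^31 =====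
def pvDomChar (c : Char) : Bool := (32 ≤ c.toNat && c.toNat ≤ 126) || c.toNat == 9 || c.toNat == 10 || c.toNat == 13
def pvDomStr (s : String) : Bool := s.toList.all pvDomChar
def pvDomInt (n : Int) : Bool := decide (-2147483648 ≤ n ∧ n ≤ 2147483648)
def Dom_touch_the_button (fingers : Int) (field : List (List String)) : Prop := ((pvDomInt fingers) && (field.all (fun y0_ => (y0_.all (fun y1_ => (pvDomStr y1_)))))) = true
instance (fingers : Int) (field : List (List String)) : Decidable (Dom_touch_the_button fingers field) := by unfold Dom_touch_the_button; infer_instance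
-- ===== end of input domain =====

-- B replaces A's dict count-then-filter with sort-then-scan over runs of equal cells (alternative algorithm, same results).


-- ===== PORT A =====
def touch_the_button (fingers : Int) (field : List (List String)) : Int :=
  -- score = 0; counter = {}; for line in field: for num in line: counter[num] = counter.get(num, 0) + 1
  let counter : PySem.Dict String Int :=
    field.foldl (fun c line => line.foldl (fun c num => c.insert num (c.getD num 0 + 1)) c) PySem.Dict.empty
  -- for value in counter: if counter[value] <= fingers and value != '.': score += 1
  -- (counter[value] never raises: value iterates the keys; getD 0 is exact here)
  counter.keys.foldl (fun score value => if counter.getD value 0 ≤ fingers ∧ value ≠ "." then score + 1 else score) 0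

-- ===== PORT B =====
-- inner while: j advances over the run of cells equal to cells[i]; outer while moves i to j
def scanRuns (fingers : Int) : List String → Int
  | [] => 0
  | x :: t =>
    let run := (x :: t).takeWhile (fun c => c == x)
    let rest := (x :: t).dropWhile (fun c => c == x)
    (if x ≠ "." ∧ (run.length : Int) ≤ fingers then 1 else 0) + scanRuns fingers rest
termination_by l => l.length
decreasing_by
  simp only [List.dropWhile, beq_self_eq_true, List.length_cons]
  exact Nat.lt_succ_of_le (List.length_dropWhile_le _ t)

def touch_the_button_alt (fingers : Int) (field : List (List String)) : Int :=
  scanRuns fingers (PySem.List.sorted field.flatten (fun x => x) false)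

-- ===== PRECONDITION & SPEC =====
def Spec_touch_the_button (fingers : Int) (field : List (List String)) (out : Int) : Prop := out = touch_the_button_alt fingers field
instance (fingers : Int) (field : List (List String)) (out : Int) : Decidable (Spec_touch_the_button fingers field out) := by unfold Spec_touch_the_button; infer_instance

-- ===== CLAIM (what is proved, stated in full; the proofs are below) =====
def Claim_equal_touch_the_button : Prop := ∀ (fingers : Int) (field : List (List String)), Dom_touch_the_button fingers field → Spec_touch_the_button fingers field (touch_the_button fingers field)

-- ===== LEMMAS AND PROOFS =====

-- A = countP over the distinct cells
theorem touch_eq_countP (fingers : Int) (field : List (List String)) :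
    touch_the_button fingers field =
      ((PySem.List.dedup field.flatten).countP
        (fun k => decide ((field.flatten.count k : Int) ≤ fingers ∧ k ≠ ".")) : Int) := by
  simp only [touch_the_button]
  rw [← List.foldl_flatten, PySem.Dict.foldl_insert_getD_add_one_eq_counter,
      PySem.List.foldl_ite_add_one]
  simp [PySem.Dict.getD_counter, PySem.Dict.keys_counter]

-- the run scan on a sorted list counts the qualifying distinct elements
theorem scanRuns_eq_aux (fingers : Int) :
    ∀ (n : Nat) (l : List String), l.length ≤ n → l.Pairwise (· ≤ ·) →
      scanRuns fingers l =
        ((PySem.List.dedup l).countP (fun k => decide ((l.count k : Int) ≤ fingers ∧ k ≠ ".")) : Int) := by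
  intro n
  induction n with
  | zero =>
    intro l hl _
    have : l = [] := List.eq_nil_of_length_eq_zero (Nat.le_zero.mp hl)
    subst this; simp [scanRuns, PySem.List.dedup]
  | succ n ih =>
    intro l hl hs
    have hmemd : ∀ (ys : List String) (y : String), y ∈ PySem.List.dedup ys ↔ y ∈ ys := by
      intro ys y; simp
    match l with
    | [] => simp [scanRuns, PySem.List.dedup]
    | x :: t =>
      have hxle : ∀ y ∈ t, x ≤ y := (List.pairwise_cons.mp hs).1
      have hsub : (t.dropWhile (fun c => c == x)).Sublist t := List.dropWhile_sublist _
      have hrestpw : (t.dropWhile (fun c => c == x)).Pairwise (· ≤ ·) :=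
        ((List.pairwise_cons.mp hs).2).sublist hsub
      -- x does not occur after its run in a sorted list
      have hxnot : x ∉ t.dropWhile (fun c => c == x) := by
        intro hxmem
        cases hrw : t.dropWhile (fun c => c == x) with
        | nil => rw [hrw] at hxmem; simp at hxmem
        | cons h r =>
          rw [hrw] at hxmem hrestpw
          have hh : (h == x) = false := by
            have := List.head?_dropWhile_not (fun c => c == x) t
            rw [hrw] at this; simpa using this
          have hhx : h ≠ x := by simpa using hh
          have hhm : h ∈ t := (hrw ▸ hsub).mem List.mem_cons_self
          have hxh : x ≤ h := hxle h hhm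
          have hhxle : h ≤ x := by
            rcases List.mem_cons.mp hxmem with h1 | h1
            · exact le_of_eq h1.symm
            · exact (List.pairwise_cons.mp hrestpw).1 x h1
          exact hhx (le_antisymm hhxle hxh)
      have hrunall : ∀ y ∈ (x :: t).takeWhile (fun c => c == x), y = x := by
        intro y hy
        have := List.mem_takeWhile_imp hy
        simpa using this
      have hxrun : x ∈ (x :: t).takeWhile (fun c => c == x) := by
        rw [List.takeWhile_cons_of_pos (by simp)]
        exact List.mem_cons_self
      have hsplit : (x :: t).takeWhile (fun c => c == x) ++ t.dropWhile (fun c => c == x) = x :: t := by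
        have h := List.takeWhile_append_dropWhile (p := fun c => c == x) (l := x :: t)
        rwa [List.dropWhile_cons_of_pos (by simp)] at h
      -- counts
      have hcountx : (x :: t).count x = ((x :: t).takeWhile (fun c => c == x)).length := by
        have hca : ((x :: t).takeWhile (fun c => c == x)).count x +
            (t.dropWhile (fun c => c == x)).count x = (x :: t).count x := by
          rw [← List.count_append, hsplit]
        have h1 : ((x :: t).takeWhile (fun c => c == x)).count x =
            ((x :: t).takeWhile (fun c => c == x)).length :=
          List.count_eq_length.mpr (fun y hy => (hrunall y hy).symm)
        have h2 : (t.dropWhile (fun c => c == x)).count x = 0 := List.count_eq_zero.mpr hxnot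
        omega
      have hcountk : ∀ k, k ≠ x → (x :: t).count k = (t.dropWhile (fun c => c == x)).count k := by
        intro k hk
        have hca : ((x :: t).takeWhile (fun c => c == x)).count k +
            (t.dropWhile (fun c => c == x)).count k = (x :: t).count k := by
          rw [← List.count_append, hsplit]
        have h1 : ((x :: t).takeWhile (fun c => c == x)).count k = 0 :=
          List.count_eq_zero.mpr (fun hm => hk (hrunall k hm))
        omega
      -- dedup (x :: t) is a permutation of x :: dedup (rest)
      have hperm : (PySem.List.dedup (x :: t)).Perm (x :: PySem.List.dedup (t.dropWhile (fun c => c == x))) := by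
        apply (List.perm_ext_iff_of_nodup (PySem.List.nodup_dedup _) ?_).mpr
        · intro y
          rw [hmemd]
          constructor
          · intro hy
            rw [← hsplit, List.mem_append] at hy
            rcases hy with hy | hy
            · simp [hrunall y hy]
            · simp [hy]
          · intro hy
            rcases List.mem_cons.mp hy with hy | hy
            · subst hy; rw [← hsplit]; exact List.mem_append.mpr (Or.inl hxrun)
            · rw [← hsplit]
              exact List.mem_append.mpr (Or.inr ((hmemd _ _).mp hy))
        · exact List.nodup_cons.mpr
            ⟨fun hm => hxnot ((hmemd _ _).mp hm), PySem.List.nodup_dedup _⟩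
      have hlen : (t.dropWhile (fun c => c == x)).length ≤ n := by
        have := hsub.length_le
        simp at hl; omega
      have hih := ih _ hlen hrestpw
      -- unfold one step of scanRuns
      rw [scanRuns, List.dropWhile_cons_of_pos (by simp), hih, hperm.countP_eq, List.countP_cons]
      -- predicate switch on dedup rest (counts in rest agree with counts in the whole list)
      have hcongr : (PySem.List.dedup (t.dropWhile (fun c => c == x))).countP
            (fun k => decide (((x :: t).count k : Int) ≤ fingers ∧ k ≠ ".")) =
          (PySem.List.dedup (t.dropWhile (fun c => c == x))).countP
            (fun k => decide (((t.dropWhile (fun c => c == x)).count k : Int) ≤ fingers ∧ k ≠ ".")) := by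
        apply List.countP_congr
        intro k hk
        have hkx : k ≠ x := fun h => by subst h; exact hxnot ((hmemd _ _).mp hk)
        rw [hcountk k hkx]
      rw [← hcongr]
      by_cases hc : ((x :: t).count x : Int) ≤ fingers ∧ x ≠ "."
      · have h1 : (if x ≠ "." ∧ (((x :: t).takeWhile (fun c => c == x)).length : Int) ≤ fingers
            then (1:Int) else 0) = 1 := if_pos ⟨hc.2, hcountx ▸ hc.1⟩
        have h2 : decide (((x :: t).count x : Int) ≤ fingers ∧ x ≠ ".") = true := decide_eq_true hc
        rw [h1, h2]
        push_cast
        rw [if_pos rfl]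
        ring
      · have h1 : (if x ≠ "." ∧ (((x :: t).takeWhile (fun c => c == x)).length : Int) ≤ fingers
            then (1:Int) else 0) = 0 :=
          if_neg (fun hh => hc ⟨by rw [hcountx]; exact hh.2, hh.1⟩)
        have h2 : decide (((x :: t).count x : Int) ≤ fingers ∧ x ≠ ".") = false := decide_eq_false hc
        rw [h1, h2]
        push_cast
        simp

-- ===== VERDICT (by name: the statement is the Claim_ definition above) =====
theorem touch_the_button_spec : Claim_equal_touch_the_button := by
  intro fingers field _
  unfold Spec_touch_the_button touch_the_button_alt
  rw [touch_eq_countP]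
  have hperm : (PySem.List.sorted field.flatten (fun x => x) false).Perm field.flatten :=
    PySem.List.sorted_perm _ _ _
  have hpw : (PySem.List.sorted field.flatten (fun x => x) false).Pairwise (· ≤ ·) :=
    PySem.List.sorted_pairwise _ _
  rw [scanRuns_eq_aux fingers (PySem.List.sorted field.flatten (fun x => x) false).length _ le_rfl hpw]
  have hdperm : (PySem.List.dedup field.flatten).Perm
      (PySem.List.dedup (PySem.List.sorted field.flatten (fun x => x) false)) := by
    apply (List.perm_ext_iff_of_nodup (PySem.List.nodup_dedup _) (PySem.List.nodup_dedup _)).mpr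
    intro y
    simp only [PySem.List.dedup_eq_ofList, PySem.Set.mem_ofList]
    exact (hperm.mem_iff).symm
  rw [hdperm.countP_eq]
  congr 1
  apply List.countP_congr
  intro k _
  rw [hperm.count_eq]
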